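-- pv_equiv track=rewrite | github.com/PatrickKalkman/Advent-of-Code-2020 | day6/questions.py | calculate_answers2
-- ===== SOURCE A (Python) =====
-- import string
--
-- def calculate_answers2(raw_data):
--     answers = []
--     answer_count = dict.fromkeys(string.ascii_lowercase, 0)
--
--     row_count = 0
--     for line in raw_data:
--         if line == '\n':
--             answers.append((row_count, answer_count))
--             answer_count = dict.fromkeys(string.ascii_lowercase, 0)
--             row_count = 0
--         else:
--             row_count += 1
--             for char in line.strip():
--                 answer_count[char] += 1
--
--     answers.append((row_count, answer_count))
--
--     return answers
-- ===== SOURCE B (Python) =====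
-- import string
--
--
-- def _tally(group):
--     counts = dict.fromkeys(string.ascii_lowercase, 0)
--     for line in group:
--         for char in line.strip():
--             counts[char] += 1
--     return counts
--
--
-- def _split_groups(raw_data):
--     groups, current = [], []
--     for line in raw_data:
--         if line == '\n':
--             groups.append(current)
--             current = []
--         else:
--             current.append(line)
--     groups.append(current)
--     return groups
--
--
-- def calculate_answers2(raw_data):
--     return [(len(g), _tally(g)) for g in _split_groups(raw_data)]
-- ===== Notes on version B (the rewrite author's own statement) =====
-- stated objective: simpler
-- what changed: B first partitions the lines into group sublists in one pass, then maps each group to (size, letter-tally) with a comprehension, instead of A's single loop threading three pieces of mutable state.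
-- outside the precondition, e.g. on calculate_answers2(['A\n']): A raises KeyError, B raises KeyError
import Mathlib
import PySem

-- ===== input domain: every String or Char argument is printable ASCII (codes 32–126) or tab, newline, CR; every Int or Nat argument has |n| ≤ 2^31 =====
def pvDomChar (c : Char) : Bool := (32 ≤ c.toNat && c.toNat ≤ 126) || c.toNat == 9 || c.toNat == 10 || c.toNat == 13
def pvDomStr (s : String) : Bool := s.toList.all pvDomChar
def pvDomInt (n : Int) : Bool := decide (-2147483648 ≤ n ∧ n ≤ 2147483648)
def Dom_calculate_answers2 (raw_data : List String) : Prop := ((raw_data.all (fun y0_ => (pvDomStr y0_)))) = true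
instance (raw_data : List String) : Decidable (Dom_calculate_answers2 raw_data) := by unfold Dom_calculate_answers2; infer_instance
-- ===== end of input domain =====

-- B replaces A's single loop over three pieces of mutable state by partition-into-groups
-- followed by a map (size, tally); objective: simpler. Equal return values on Pre_.

-- ===== PORT A =====
-- string.ascii_lowercase
def pvAsciiLower : List Char := "abcdefghijklmnopqrstuvwxyz".toList

-- dict.fromkeys(string.ascii_lowercase, 0)
def pvInitCnt : PySem.Dict String Int :=
  pvAsciiLower.foldl (fun d c => d.insert (String.mk [c]) 0) PySem.Dict.empty

-- for char in line.strip(): answer_count[char] += 1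
-- (Dict.modify is exact here on Pre_, where every counted char is a key of the dict;
--  Python raises KeyError otherwise, which Pre_ excludes)
def pvCountLine (cnt : PySem.Dict String Int) (line : String) : PySem.Dict String Int :=
  (PySem.Str.strip line).toList.foldl (fun d c => d.modify (String.mk [c]) 0 (· + 1)) cnt

def calculate_answers2 (raw_data : List String) : List (Int × (List (String × Int))) :=
  let s := raw_data.foldl
    (fun (st : List (Int × List (String × Int)) × PySem.Dict String Int × Int) line =>
      if line == "\n" then (st.1 ++ [(st.2.2, st.2.1.items)], pvInitCnt, 0)
      else (st.1, pvCountLine st.2.1 line, st.2.2 + 1))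
    ([], pvInitCnt, 0)
  s.1 ++ [(s.2.2, s.2.1.items)]

-- ===== PORT B =====
def pvSplitGroups (raw_data : List String) : List (List String) :=
  let s := raw_data.foldl
    (fun (st : List (List String) × List String) line =>
      if line == "\n" then (st.1 ++ [st.2], []) else (st.1, st.2 ++ [line]))
    ([], [])
  s.1 ++ [s.2]

def pvTally (group : List String) : List (String × Int) :=
  (group.foldl pvCountLine pvInitCnt).items

def calculate_answers2_alt (raw_data : List String) : List (Int × (List (String × Int))) :=
  (pvSplitGroups raw_data).map (fun g => ((g.length : Int), pvTally g))

-- ===== PRECONDITION & SPEC =====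
-- Pre_ excludes exactly the inputs where Python A raises KeyError: a non-separator line whose
-- stripped content contains a character outside 'a'..'z'.
def Pre_calculate_answers2 (raw_data : List String) : Prop :=
  (raw_data.all (fun l => l == "\n" ||
    (PySem.Str.strip l).toList.all (fun c => 97 ≤ c.toNat && c.toNat ≤ 122))) = true

instance (raw_data : List String) : Decidable (Pre_calculate_answers2 raw_data) := by
  unfold Pre_calculate_answers2; infer_instance

def pvWitness_calculate_answers2 : List String := ["ab\n", "a\n", "\n", "b\n"]

def Spec_calculate_answers2 (raw_data : List String) (out : List (Int × (List (String × Int)))) : Prop := out = calculate_answers2_alt raw_data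
instance (raw_data : List String) (out : List (Int × (List (String × Int)))) : Decidable (Spec_calculate_answers2 raw_data out) := by unfold Spec_calculate_answers2; infer_instance

-- ===== CLAIM (what is proved, stated in full; the proofs are below) =====
def Claim_equal_calculate_answers2 : Prop := ∀ (raw_data : List String), Dom_calculate_answers2 raw_data → Pre_calculate_answers2 raw_data → Spec_calculate_answers2 raw_data (calculate_answers2 raw_data)

-- ===== LEMMAS AND PROOFS =====
-- the tally of a group as a Dict (B's inner fold, before .items)
def pvTallyD (g : List String) : PySem.Dict String Int := g.foldl pvCountLine pvInitCnt

-- the projection applied to each group by B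
def pvF (g : List String) : Int × List (String × Int) := ((g.length : Int), pvTally g)

-- A's loop, started on the state describing "groups gs already emitted, current group cur",
-- equals B's partition loop under the same description.
lemma pv_loop_eq : ∀ (raw : List String) (gs gs' : List (List String)) (cur cur' : List String),
    raw.foldl
      (fun (st : List (List String) × List String) line =>
        if line == "\n" then (st.1 ++ [st.2], []) else (st.1, st.2 ++ [line]))
      (gs, cur) = (gs', cur') →
    raw.foldl
      (fun (st : List (Int × List (String × Int)) × PySem.Dict String Int × Int) line =>
        if line == "\n" then (st.1 ++ [(st.2.2, st.2.1.items)], pvInitCnt, 0)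
        else (st.1, pvCountLine st.2.1 line, st.2.2 + 1))
      (gs.map pvF, pvTallyD cur, (cur.length : Int)) =
    (gs'.map pvF, pvTallyD cur', (cur'.length : Int)) := by
  intro raw
  induction raw with
  | nil =>
    intro gs gs' cur cur' hB
    simp only [List.foldl_nil] at hB ⊢
    cases hB
    rfl
  | cons l tl ih =>
    intro gs gs' cur cur' hB
    simp only [List.foldl_cons] at hB ⊢
    by_cases h : l == "\n"
    · simp only [h, if_true] at hB ⊢
      have h1 : gs.map pvF ++ [((cur.length : Int), (pvTallyD cur).items)]
          = (gs ++ [cur]).map pvF := by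
        simp only [List.map_append, List.map_cons, List.map_nil]; rfl
      rw [h1]
      have IH := ih (gs ++ [cur]) gs' [] cur' hB
      simp only [List.length_nil, Nat.cast_zero] at IH
      rw [show pvTallyD ([] : List String) = pvInitCnt from by
            simp only [pvTallyD, List.foldl_nil]] at IH
      exact IH
    · simp only [h] at hB ⊢
      have h1 : pvCountLine (pvTallyD cur) l = pvTallyD (cur ++ [l]) := by
        simp [pvTallyD]
      have h2 : ((cur.length : Int) + 1) = ((cur ++ [l]).length : Int) := by
        simp
      rw [h1, h2]
      exact ih gs gs' (cur ++ [l]) cur' hB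

-- ===== VERDICT (by name: the statement is the Claim_ definition above) =====
theorem calculate_answers2_spec : Claim_equal_calculate_answers2 := by
  intro raw _ _
  unfold Spec_calculate_answers2 calculate_answers2 calculate_answers2_alt pvSplitGroups
  rcases hs : raw.foldl
      (fun (st : List (List String) × List String) line =>
        if line == "\n" then (st.1 ++ [st.2], []) else (st.1, st.2 ++ [line]))
      ([], []) with ⟨gs', cur'⟩
  have h := pv_loop_eq raw [] gs' [] cur' hs
  simp only [List.map_nil, List.length_nil, Nat.cast_zero] at h
  have e : pvTallyD ([] : List String) = pvInitCnt := by
    simp only [pvTallyD, List.foldl_nil]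
  rw [e] at h
  rw [h]
  simp only [List.map_append, List.map_cons, List.map_nil]
  rfl
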